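-- pv_equiv track=rewrite | github.com/ALEXJAZZ008008/sudoku | sudoku.py | fill_blanks
-- ===== SOURCE A (Python) =====
-- def fill_blanks(blanks, puzzle_list, puzzle_array):
--     new_puzzle_array = puzzle_array.copy()
--
--     blanks_index = 0
--
--     for i in range(len(puzzle_list)):
--         for j in range(len(puzzle_list[i])):
--             if len(puzzle_list[i][j]) < 1:
--                 new_puzzle_array[i][j] = blanks[blanks_index]
--
--                 blanks_index = blanks_index + 1
--
--     return new_puzzle_array
-- ===== SOURCE B (Python) =====
-- def fill_blanks(blanks, puzzle_list, puzzle_array):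
--     # Closed-form index arithmetic instead of a mutable counter: each blank
--     # cell's value position is a prefix sum (blanks in earlier rows + blanks
--     # earlier in its own row), so the whole result is one pure nested
--     # comprehension over puzzle_array. Return-value equivalence only: A
--     # mutates puzzle_array's inner rows in place, B builds fresh rows.
--     def blanks_before(row, j):
--         return sum(1 for c in row[:j] if len(c) < 1)
--
--     starts = [sum(blanks_before(r, len(r)) for r in puzzle_list[:i])
--               for i in range(len(puzzle_list))]
--
--     return [
--         [blanks[starts[i] + blanks_before(puzzle_list[i], j)]
--          if i < len(puzzle_list)
--             and j < len(puzzle_list[i])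
--             and len(puzzle_list[i][j]) < 1
--          else v
--          for j, v in enumerate(old_row)]
--         for i, old_row in enumerate(puzzle_array)
--     ]
-- ===== Notes on version B (the rewrite author's own statement) =====
-- stated objective: alternative
-- what changed: B removes A's sequential mutable counter and in-place cell assignments entirely: each blank cell's position in blanks is computed by closed-form prefix sums (blanks in earlier rows plus blanks earlier in the row), so the result is one pure nested comprehension over puzzle_array.
import Mathlib
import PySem

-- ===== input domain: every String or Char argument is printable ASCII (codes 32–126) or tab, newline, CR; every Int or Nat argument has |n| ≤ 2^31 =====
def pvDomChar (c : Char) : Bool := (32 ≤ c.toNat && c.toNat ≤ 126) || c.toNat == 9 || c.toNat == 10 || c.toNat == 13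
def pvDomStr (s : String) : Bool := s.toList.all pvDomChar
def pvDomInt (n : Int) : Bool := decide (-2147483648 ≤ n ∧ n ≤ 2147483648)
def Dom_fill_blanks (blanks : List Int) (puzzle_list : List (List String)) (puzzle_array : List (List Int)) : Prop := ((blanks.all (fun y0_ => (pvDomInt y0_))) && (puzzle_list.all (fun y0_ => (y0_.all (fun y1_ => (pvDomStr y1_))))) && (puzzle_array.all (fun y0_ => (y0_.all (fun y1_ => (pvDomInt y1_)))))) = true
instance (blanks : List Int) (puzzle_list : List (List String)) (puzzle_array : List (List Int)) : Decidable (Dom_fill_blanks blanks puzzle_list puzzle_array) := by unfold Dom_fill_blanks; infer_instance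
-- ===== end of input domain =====

-- B replaces A's mutable blank counter and in-place assignments by closed-form prefix-sum index
-- arithmetic in a pure nested comprehension; equivalence is about the RETURN value only
-- (Python A mutates the shared inner rows of puzzle_array in place, B builds fresh rows).

-- ===== PORT A =====
-- Python 'new_puzzle_array[i][j] = v' (exact for the in-range indices Pre_ admits)
def pySetCell (arr : List (List Int)) (i j : Int) (v : Int) : List (List Int) :=
  arr.set i.toNat ((PySem.List.pyGetD arr i []).set j.toNat v)

def fill_blanks (blanks : List Int) (puzzle_list : List (List String)) (puzzle_array : List (List Int)) : List (List Int) :=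
  ((PySem.List.pyRange 0 (puzzle_list.length : Int) 1).foldl (fun st i =>
      (PySem.List.pyRange 0 ((PySem.List.pyGetD puzzle_list i []).length : Int) 1).foldl (fun st j =>
        if PySem.Str.len (PySem.List.pyGetD (PySem.List.pyGetD puzzle_list i []) j "") < 1 then
          (pySetCell st.1 i j (PySem.List.pyGetD blanks st.2 0), st.2 + 1)
        else st) st)
    (puzzle_array, (0 : Int))).1

-- ===== PORT B =====
-- sum(1 for c in row[:j] if len(c) < 1)
def blanksBefore (row : List String) (j : Int) : Int :=
  ((PySem.List.slice row none (some j)).map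
    (fun c => if PySem.Str.len c < 1 then (1 : Int) else 0)).sum

def fill_blanks_alt (blanks : List Int) (puzzle_list : List (List String)) (puzzle_array : List (List Int)) : List (List Int) :=
  let starts := (PySem.List.pyRange 0 (puzzle_list.length : Int) 1).map (fun i =>
    ((PySem.List.slice puzzle_list none (some i)).map
      (fun r => blanksBefore r (PySem.List.len r))).sum)
  (PySem.List.enumerate puzzle_array).map (fun p =>
    (PySem.List.enumerate p.2).map (fun q =>
      if p.1 < (puzzle_list.length : Int) ∧
         q.1 < PySem.List.len (PySem.List.pyGetD puzzle_list p.1 []) ∧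
         PySem.Str.len (PySem.List.pyGetD (PySem.List.pyGetD puzzle_list p.1 []) q.1 "") < 1
      then PySem.List.pyGetD blanks
             (PySem.List.pyGetD starts p.1 0 +
              blanksBefore (PySem.List.pyGetD puzzle_list p.1 []) q.1) 0
      else q.2))

-- ===== PRECONDITION & SPEC =====
-- Pre_ excludes exactly the inputs on which Python A raises IndexError: a blank cell whose coordinates are
-- not assignable in puzzle_array, or more blank cells than blanks provides.
def Pre_fill_blanks (blanks : List Int) (puzzle_list : List (List String)) (puzzle_array : List (List Int)) : Prop :=
  (puzzle_list.map (fun r => r.countP (fun c => c == ""))).sum ≤ blanks.length ∧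
  ((List.range puzzle_list.length).all (fun i =>
    (List.range (puzzle_list.getD i []).length).all (fun j =>
      !((puzzle_list.getD i []).getD j "" == "") ||
        (decide (i < puzzle_array.length) && decide (j < (puzzle_array.getD i []).length))))) = true
instance (blanks : List Int) (puzzle_list : List (List String)) (puzzle_array : List (List Int)) : Decidable (Pre_fill_blanks blanks puzzle_list puzzle_array) := by unfold Pre_fill_blanks; infer_instance

def pvWitness_fill_blanks : List Int × List (List String) × List (List Int) :=
  ([7, 8], [["", "a"], [""]], [[1, 2], [3]])

def Spec_fill_blanks (blanks : List Int) (puzzle_list : List (List String)) (puzzle_array : List (List Int)) (out : List (List Int)) : Prop := out = fill_blanks_alt blanks puzzle_list puzzle_array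
instance (blanks : List Int) (puzzle_list : List (List String)) (puzzle_array : List (List Int)) (out : List (List Int)) : Decidable (Spec_fill_blanks blanks puzzle_list puzzle_array out) := by unfold Spec_fill_blanks; infer_instance

-- ===== CLAIM (what is proved, stated in full; the proofs are below) =====
def Claim_equal_fill_blanks : Prop := ∀ (blanks : List Int) (puzzle_list : List (List String)) (puzzle_array : List (List Int)), Dom_fill_blanks blanks puzzle_list puzzle_array → Pre_fill_blanks blanks puzzle_list puzzle_array → Spec_fill_blanks blanks puzzle_list puzzle_array (fill_blanks blanks puzzle_list puzzle_array)

-- ===== LEMMAS AND PROOFS =====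

def blankB (c : String) : Bool := decide (PySem.Str.len c < 1)
def cnt (r : List String) : Nat := r.countP blankB
def rowC (r : List String) (j : Nat) : Nat := (r.take j).countP blankB
def gridS (pl : List (List String)) (i : Nat) : Nat := ((pl.take i).map cnt).sum

-- A's inner loop over one row, with Nat indices
def rowFillN (blanks : List Int) : List String → Nat → List Int → Int → List Int × Int
  | [], _, o, t => (o, t)
  | c :: r, js, o, t =>
      if blankB c then rowFillN blanks r (js + 1) (o.set js (PySem.List.pyGetD blanks t 0)) (t + 1)
      else rowFillN blanks r (js + 1) o t

-- A's outer loop, with Nat row indices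
def gridFillN (blanks : List Int) : List (List String) → Nat → List (List Int) → Int → List (List Int) × Int
  | [], _, arr, t => (arr, t)
  | r :: pl, s, arr, t =>
      let p := rowFillN blanks r 0 (arr.getD s []) t
      gridFillN blanks pl (s + 1) (arr.set s p.1) p.2

theorem rowFillN_snd (blanks : List Int) (r : List String) : ∀ (js : Nat) (o : List Int) (t : Int),
    (rowFillN blanks r js o t).2 = t + (cnt r : Int) := by
  induction r with
  | nil => intro js o t; simp [rowFillN, cnt]
  | cons c r ih =>
    intro js o t
    by_cases h : blankB c = true
    · rw [rowFillN, if_pos h, ih]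
      simp only [cnt, List.countP_cons, h]
      push_cast; ring
    · rw [rowFillN, if_neg h, ih]
      simp [cnt, h]

theorem rowFillN_length (blanks : List Int) (r : List String) : ∀ (js : Nat) (o : List Int) (t : Int),
    (rowFillN blanks r js o t).1.length = o.length := by
  induction r with
  | nil => intro js o t; simp [rowFillN]
  | cons c r ih =>
    intro js o t
    by_cases h : blankB c = true
    · simp [rowFillN, h, ih]
    · simp [rowFillN, h, ih]

theorem rowFillN_getD (blanks : List Int) (r : List String) : ∀ (js : Nat) (o : List Int) (t : Int)
    (j : Nat), j < o.length →
    (rowFillN blanks r js o t).1.getD j 0 =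
      if js ≤ j ∧ j - js < r.length ∧ blankB (r.getD (j - js) "") then
        PySem.List.pyGetD blanks (t + (rowC r (j - js) : Int)) 0
      else o.getD j 0 := by
  induction r with
  | nil => intro js o t j hj; simp [rowFillN]
  | cons c r ih =>
    intro js o t j hj
    by_cases h : blankB c = true
    · rw [rowFillN, if_pos h, ih _ _ _ _ (by simpa using hj)]
      rcases lt_trichotomy j js with hlt | heq | hgt
      · rw [if_neg (by omega), if_neg (by omega), List.getD_eq_getElem?_getD,
            List.getElem?_set_ne (by omega), ← List.getD_eq_getElem?_getD]
      · subst heq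
        rw [if_neg (by omega), if_pos ⟨le_refl _, by simp, by simpa using h⟩,
            List.getD_eq_getElem _ _ (by simpa using hj),
            List.getElem_set_self (by simpa using hj)]
        simp [rowC]
      · have e1 : j - js = (j - (js + 1)) + 1 := by omega
        rw [e1, List.getD_cons_succ]
        by_cases hc : ((j - (js + 1)) < r.length ∧ blankB (r.getD (j - (js + 1)) "") = true)
        · rw [if_pos ⟨by omega, hc.1, hc.2⟩, if_pos ⟨by omega, by simp; omega, hc.2⟩]
          congr 1
          simp only [rowC, List.take_succ_cons, List.countP_cons, h, if_pos]
          push_cast; ring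
        · rw [if_neg (fun ⟨a, b, cc⟩ => hc ⟨by omega, cc⟩),
              if_neg (fun ⟨a, b, cc⟩ => hc ⟨by simp at b; omega, cc⟩),
              List.getD_eq_getElem?_getD, List.getElem?_set_ne (by omega),
              ← List.getD_eq_getElem?_getD]
    · rw [rowFillN, if_neg h, ih _ _ _ _ hj]
      rcases lt_trichotomy j js with hlt | heq | hgt
      · rw [if_neg (by omega), if_neg (by omega)]
      · subst heq
        rw [if_neg (by omega), if_neg (fun ⟨a, b, cc⟩ => h (by simpa using cc))]
      · have e1 : j - js = (j - (js + 1)) + 1 := by omega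
        rw [e1, List.getD_cons_succ]
        by_cases hc : ((j - (js + 1)) < r.length ∧ blankB (r.getD (j - (js + 1)) "") = true)
        · rw [if_pos ⟨by omega, hc.1, hc.2⟩, if_pos ⟨by omega, by simp; omega, hc.2⟩]
          congr 2
          simp [rowC, List.take_succ_cons, h]
        · rw [if_neg (fun ⟨a, b, cc⟩ => hc ⟨by omega, cc⟩),
              if_neg (fun ⟨a, b, cc⟩ => hc ⟨by simp at b; omega, cc⟩)]

theorem gridFillN_length (blanks : List Int) (pl : List (List String)) : ∀ (s : Nat) (arr : List (List Int)) (t : Int),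
    (gridFillN blanks pl s arr t).1.length = arr.length := by
  induction pl with
  | nil => intro s arr t; simp [gridFillN]
  | cons r pl ih =>
    intro s arr t
    simp [gridFillN, ih]

theorem gridFillN_row_length (blanks : List Int) (pl : List (List String)) : ∀ (s : Nat) (arr : List (List Int)) (t : Int)
    (i : Nat), ((gridFillN blanks pl s arr t).1.getD i []).length = (arr.getD i []).length := by
  induction pl with
  | nil => intro s arr t i; simp [gridFillN]
  | cons r pl ih =>
    intro s arr t i
    rw [gridFillN, ih]
    by_cases h : s = i
    · subst h
      by_cases hs : s < arr.length
      · rw [List.getD_eq_getElem _ _ (by simpa using hs), List.getElem_set_self (by simpa using hs),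
            rowFillN_length, List.getD_eq_getElem _ _ hs]
      · rw [List.set_eq_of_length_le (by omega)]
    · simp [List.getD_eq_getElem?_getD, List.getElem?_set_ne (show s ≠ i from h)]

theorem gridFillN_getD (blanks : List Int) (pl : List (List String)) : ∀ (s : Nat) (arr : List (List Int)) (t : Int)
    (i j : Nat), i < arr.length → j < (arr.getD i []).length →
    (((gridFillN blanks pl s arr t).1.getD i []).getD j 0) =
      if s ≤ i ∧ i - s < pl.length ∧ j < (pl.getD (i - s) []).length ∧ blankB ((pl.getD (i - s) []).getD j "") then
        PySem.List.pyGetD blanks (t + ((gridS pl (i - s) + rowC (pl.getD (i - s) []) j : Nat) : Int)) 0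
      else (arr.getD i []).getD j 0 := by
  induction pl with
  | nil => intro s arr t i j hi hj; simp [gridFillN]
  | cons r pl ih =>
    intro s arr t i j hi hj
    rw [gridFillN]
    by_cases h : s = i
    · subst h
      have hrow : (arr.set s (rowFillN blanks r 0 (arr.getD s []) t).1).getD s [] =
          (rowFillN blanks r 0 (arr.getD s []) t).1 := by
        rw [List.getD_eq_getElem _ _ (by simpa using hi), List.getElem_set_self (by simpa using hi)]
      rw [ih _ _ _ _ _ (by simpa using hi) (by rw [hrow, rowFillN_length]; exact hj),
          if_neg (by omega), hrow,
          rowFillN_getD _ _ _ _ _ _ hj]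
      by_cases hc : (j < r.length ∧ blankB (r.getD j "") = true)
      · rw [if_pos ⟨by omega, by simpa using hc.1, by simpa using hc.2⟩,
            if_pos ⟨le_refl _, by simp, by simpa using hc.1, by simpa using hc.2⟩]
        congr 1
        simp [gridS]
      · rw [if_neg (fun ⟨a, b, cc⟩ => hc ⟨by simpa using b, by simpa using cc⟩),
            if_neg (fun ⟨a, b, cc, dd⟩ => hc ⟨by simpa using cc, by simpa using dd⟩)]
    · have hne : (arr.set s (rowFillN blanks r 0 (arr.getD s []) t).1).getD i [] = arr.getD i [] := by
        simp [List.getD_eq_getElem?_getD, List.getElem?_set_ne h]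
      rw [ih _ _ _ _ _ (by simpa using hi) (by rw [hne]; exact hj), hne, rowFillN_snd]
      rcases lt_or_gt_of_ne h with hgt | hlt
      · have e1 : i - s = (i - (s + 1)) + 1 := by omega
        rw [e1, List.getD_cons_succ]
        by_cases hc : ((i - (s + 1)) < pl.length ∧ j < (pl.getD (i - (s + 1)) []).length ∧
            blankB ((pl.getD (i - (s + 1)) []).getD j "") = true)
        · rw [if_pos ⟨by omega, hc.1, hc.2.1, hc.2.2⟩,
              if_pos ⟨by omega, by simp; omega, hc.2.1, hc.2.2⟩]
          congr 1
          simp only [gridS, List.take_succ_cons, List.map_cons, List.sum_cons]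
          push_cast; ring
        · rw [if_neg (fun ⟨a, b, cc, dd⟩ => hc ⟨by omega, cc, dd⟩),
              if_neg (fun ⟨a, b, cc, dd⟩ => hc ⟨by simp at b; omega, cc, dd⟩)]
      · rw [if_neg (by omega), if_neg (by omega)]

theorem set_getD_self (l : List (List Int)) (s : Nat) : l.set s (l.getD s []) = l := by
  by_cases h : s < l.length
  · rw [List.getD_eq_getElem _ _ h]; exact List.set_getElem_self h
  · rw [List.set_eq_of_length_le (by omega)]

theorem inner_eq (blanks : List Int) (r : List String) : ∀ (js s : Nat) (arr : List (List Int)) (t : Int),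
    (PySem.List.enumerate r (js : Int)).foldl (fun st q =>
        if PySem.Str.len q.2 < 1 then
          (pySetCell st.1 (s : Int) q.1 (PySem.List.pyGetD blanks st.2 0), st.2 + 1)
        else st) (arr, t)
      = (arr.set s (rowFillN blanks r js (arr.getD s []) t).1,
         (rowFillN blanks r js (arr.getD s []) t).2) := by
  induction r with
  | nil =>
    intro js s arr t
    rw [PySem.List.enumerate_nil, List.foldl_nil, rowFillN, set_getD_self]
  | cons c r ih =>
    intro js s arr t
    rw [PySem.List.enumerate_cons, List.foldl_cons]
    by_cases h : blankB c = true
    · have h' : PySem.Str.len c < 1 := by simpa [blankB] using h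
      rw [if_pos h']
      have hcell : pySetCell arr (s : Int) (js : Int) (PySem.List.pyGetD blanks t 0)
          = arr.set s ((arr.getD s []).set js (PySem.List.pyGetD blanks t 0)) := by
        unfold pySetCell
        rw [PySem.List.pyGetD_natCast, Int.toNat_natCast, Int.toNat_natCast]
      have hcast : (js : Int) + 1 = ((js + 1 : Nat) : Int) := by push_cast; ring
      rw [hcell, hcast, ih (js + 1) s _ (t + 1)]
      have hrow : (arr.set s ((arr.getD s []).set js (PySem.List.pyGetD blanks t 0))).getD s []
          = (arr.getD s []).set js (PySem.List.pyGetD blanks t 0) := by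
        by_cases hs : s < arr.length
        · rw [List.getD_eq_getElem _ _ (by simpa using hs), List.getElem_set_self (by simpa using hs)]
        · rw [List.set_eq_of_length_le (by omega), List.getD_eq_default _ _ (by omega)]
          simp
      rw [hrow, List.set_set, rowFillN, if_pos h]
    · have h' : ¬ PySem.Str.len c < 1 := by simpa [blankB] using h
      rw [if_neg h']
      have hcast : (js : Int) + 1 = ((js + 1 : Nat) : Int) := by push_cast; ring
      rw [hcast, ih (js + 1) s arr t, rowFillN, if_neg h]

theorem outer_eq (blanks : List Int) (pl : List (List String)) : ∀ (s : Nat) (arr : List (List Int)) (t : Int),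
    (PySem.List.enumerate pl (s : Int)).foldl (fun st p =>
        (PySem.List.enumerate p.2 0).foldl (fun st q =>
          if PySem.Str.len q.2 < 1 then
            (pySetCell st.1 p.1 q.1 (PySem.List.pyGetD blanks st.2 0), st.2 + 1)
          else st) st) (arr, t)
      = gridFillN blanks pl s arr t := by
  induction pl with
  | nil => intro s arr t; simp [gridFillN]
  | cons r pl ih =>
    intro s arr t
    rw [PySem.List.enumerate_cons, List.foldl_cons, gridFillN]
    dsimp only
    have hin := inner_eq blanks r 0 s arr t
    rw [Nat.cast_zero] at hin
    rw [hin]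
    have hcast : (s : Int) + 1 = ((s + 1 : Nat) : Int) := by push_cast; ring
    rw [hcast, ih (s + 1) _ _]

-- A's port computes gridFillN
theorem fill_blanks_eq_gridFillN (blanks : List Int) (pl : List (List String)) (pa : List (List Int)) :
    fill_blanks blanks pl pa = (gridFillN blanks pl 0 pa 0).1 := by
  unfold fill_blanks
  rw [← outer_eq blanks pl 0 pa 0]
  have h0 : ((0 : Nat) : Int) = (0 : Int) := rfl
  rw [h0, PySem.List.enumerate_eq_map_pyRange pl ([] : List String), List.foldl_map,
      PySem.List.len_eq]
  congr 2
  funext st i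
  dsimp only
  rw [PySem.List.enumerate_eq_map_pyRange (PySem.List.pyGetD pl i []) "", List.foldl_map,
      PySem.List.len_eq]

-- pointwise value of B
theorem blanksBefore_eq (r : List String) (j : Nat) :
    blanksBefore r (j : Int) = ((rowC r j : Nat) : Int) := by
  unfold blanksBefore rowC
  rw [PySem.List.slice_to_natCast]
  rw [← PySem.List.sum_map_ite_one_zero blankB]
  exact congrArg List.sum (List.map_congr_left (fun c _ => by simp [blankB]))

theorem getD_map_enumerate {α β : Type} (f : Int × α → β) (xs : List α) (j : Nat) (d : β)
    (hj : j < xs.length) :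
    (List.map f (PySem.List.enumerate xs)).getD j d = f ((j : Int), xs[j]) := by
  rw [List.getD_eq_getElem _ _ (by simpa [PySem.List.length_enumerate] using hj),
      List.getElem_map, PySem.List.getElem_enumerate _ _ _ (by simpa [PySem.List.length_enumerate] using hj)]
  simp

theorem alt_getElem (blanks : List Int) (pl : List (List String)) (pa : List (List Int))
    (i j : Nat) (hi : i < pa.length) (hj : j < (pa.getD i []).length) :
    ((fill_blanks_alt blanks pl pa).getD i []).getD j 0 =
      if i < pl.length ∧ j < (pl.getD i []).length ∧ blankB ((pl.getD i []).getD j "") then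
        PySem.List.pyGetD blanks (((gridS pl i : Nat) : Int) + ((rowC (pl.getD i []) j : Nat) : Int)) 0
      else (pa.getD i []).getD j 0 := by
  rw [List.getD_eq_getElem _ _ hi] at hj
  unfold fill_blanks_alt
  rw [getD_map_enumerate _ pa i [] hi]
  dsimp only
  rw [getD_map_enumerate _ (pa[i]) j 0 hj]
  dsimp only
  rw [PySem.List.pyGetD_natCast pl i ([] : List String),
      PySem.List.pyGetD_natCast (pl.getD i []) j ""]
  simp only [PySem.List.len_eq]
  by_cases hc : (i < pl.length ∧ j < (pl.getD i []).length ∧ blankB ((pl.getD i []).getD j "") = true)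
  · rw [if_pos ⟨by exact_mod_cast hc.1, by exact_mod_cast hc.2.1, by
        have := hc.2.2; simpa [blankB] using this⟩, if_pos hc]
    congr 1
    rw [PySem.List.pyGetD_map_pyRange _ pl.length i _ hc.1,
        PySem.List.slice_to_natCast pl i, blanksBefore_eq (pl.getD i []) j]
    congr 1
    have hm : ∀ r ∈ pl.take i, blanksBefore r ((r.length : Nat) : Int) = ((cnt r : Nat) : Int) := by
      intro r _
      rw [blanksBefore_eq r r.length]
      simp [rowC, cnt]
    rw [List.map_congr_left hm, gridS]
    rw [show (fun r => ((cnt r : Nat) : Int)) = (fun n => ((n : Nat) : Int)) ∘ cnt from rfl,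
        ← List.map_map]
    exact (Nat.cast_list_sum _).symm
  · rw [if_neg (fun ⟨a, b, c⟩ => hc ⟨by exact_mod_cast a, by exact_mod_cast b, by
        simpa [blankB] using c⟩), if_neg hc,
        List.getD_eq_getElem _ _ hi, List.getD_eq_getElem _ _ hj]

theorem alt_length (blanks : List Int) (pl : List (List String)) (pa : List (List Int)) :
    (fill_blanks_alt blanks pl pa).length = pa.length := by
  simp [fill_blanks_alt, PySem.List.length_enumerate]

theorem alt_row_length (blanks : List Int) (pl : List (List String)) (pa : List (List Int)) (i : Nat) :
    ((fill_blanks_alt blanks pl pa).getD i []).length = (pa.getD i []).length := by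
  by_cases h : i < pa.length
  · rw [List.getD_eq_getElem _ _ (by rw [alt_length]; exact h), List.getD_eq_getElem _ _ h]
    simp [fill_blanks_alt, PySem.List.getElem_enumerate, PySem.List.length_enumerate]
  · rw [List.getD_eq_default _ _ (by rw [alt_length]; omega), List.getD_eq_default _ _ (by omega)]

-- ===== VERDICT (by name: the statement is the Claim_ definition above) =====
theorem fill_blanks_spec : Claim_equal_fill_blanks := by
  intro blanks pl pa _ _
  unfold Spec_fill_blanks
  rw [fill_blanks_eq_gridFillN]
  apply List.ext_getElem (by rw [gridFillN_length, alt_length])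
  intro i h1 h2
  have hiA : i < pa.length := by rw [gridFillN_length] at h1; exact h1
  rw [← List.getD_eq_getElem _ _ h1, ← List.getD_eq_getElem _ _ h2]
  apply List.ext_getElem (by rw [gridFillN_row_length, alt_row_length])
  intro j hj1 hj2
  have hjA : j < (pa.getD i []).length := by rw [gridFillN_row_length] at hj1; exact hj1
  rw [← List.getD_eq_getElem _ _ hj1, ← List.getD_eq_getElem _ _ hj2]
  rw [gridFillN_getD blanks pl 0 pa 0 i j hiA hjA, alt_getElem blanks pl pa i j hiA hjA]
  simp only [Nat.sub_zero, Nat.zero_le, true_and, zero_add, Nat.cast_add]
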